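-- pv_equiv track=rewrite | github.com/Jweewee/Goldfish | services/embedding_service.py | chunk_conversation
-- ===== SOURCE A (Python) =====
-- from typing import List, Dict, Any, Tuple
--
-- def chunk_conversation(conversation_history: List[Dict]) -> List[str]:
--     """
--     Split conversation into meaningful chunks for embedding
--
--     Args:
--         conversation_history: List of conversation turns
--
--     Returns:
--         List of text chunks
--     """
--     chunks = []
--
--     # Group consecutive user-assistant pairs
--     current_chunk = ""
--     for turn in conversation_history:
--         role = turn.get("role", "")
--         content = turn.get("content", "")
--
--         if role == "user":
--             if current_chunk:
--                 chunks.append(current_chunk.strip())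
--                 current_chunk = ""
--             current_chunk = f"User: {content}\n"
--         elif role == "assistant":
--             current_chunk += f"Assistant: {content}\n"
--
--     # Add the last chunk if it exists
--     if current_chunk.strip():
--         chunks.append(current_chunk.strip())
--
--     # If no chunks were created, create one from the entire conversation
--     if not chunks:
--         full_conversation = "\n".join([
--             f"{turn.get('role', '').title()}: {turn.get('content', '')}"
--             for turn in conversation_history
--         ])
--         chunks = [full_conversation]
--
--     return chunks
-- ===== SOURCE B (Python) =====
-- def chunk_conversation(conversation_history):
--     """
--     Split conversation into meaningful chunks for embedding.
--
--     Two-pass decomposition: first group consecutive user/assistant turns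
--     (a 'user' turn starts a new group), then render each group.
--     """
--     groups = []
--     for turn in conversation_history:
--         role = turn.get("role", "")
--         if role == "user":
--             groups.append([("user", turn.get("content", ""))])
--         elif role == "assistant":
--             if groups:
--                 groups[-1].append(("assistant", turn.get("content", "")))
--             else:
--                 groups = [[("assistant", turn.get("content", ""))]]
--     if groups:
--         return [
--             "\n".join(
--                 ("User: " if r == "user" else "Assistant: ") + c for r, c in g
--             ).strip()
--             for g in groups
--         ]
--     return ["\n".join(
--         turn.get("role", "").title() + ": " + turn.get("content", "")
--         for turn in conversation_history
--     )]
-- ===== Notes on version B (the rewrite author's own statement) =====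
-- stated objective: alternative
-- what changed: A builds chunks in one pass by accumulating a growing string and flushing it; B first groups the user/assistant turns into a list of groups and then renders each group with a join+strip, falling back to the title()-joined whole conversation when no group exists.
import Mathlib
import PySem

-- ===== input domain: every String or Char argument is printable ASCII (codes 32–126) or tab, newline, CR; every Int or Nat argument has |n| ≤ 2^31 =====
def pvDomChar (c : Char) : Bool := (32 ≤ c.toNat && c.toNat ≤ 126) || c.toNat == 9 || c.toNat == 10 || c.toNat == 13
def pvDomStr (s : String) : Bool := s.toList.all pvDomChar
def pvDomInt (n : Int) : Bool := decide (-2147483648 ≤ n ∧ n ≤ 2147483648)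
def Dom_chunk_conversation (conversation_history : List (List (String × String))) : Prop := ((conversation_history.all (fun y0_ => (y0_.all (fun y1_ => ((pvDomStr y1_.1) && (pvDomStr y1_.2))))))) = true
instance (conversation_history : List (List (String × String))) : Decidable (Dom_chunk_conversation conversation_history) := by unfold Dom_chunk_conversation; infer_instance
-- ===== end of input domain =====

-- B re-decomposes A's single accumulating-string pass into two passes (group the turns, then render
-- each group); same return value, objective 'alternative'. No argument is mutated.

-- shared ports of Python builtins used by both sources:
-- turn.get(key, "") on the association-list dict
def pvGet (turn : List (String × String)) (key : String) : String :=
  PySem.Dict.getD (PySem.Dict.mk turn) key ""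

-- str.title() (exact on ASCII: a letter is uppercased after a non-letter, lowercased after a letter;
-- hand-ported here because PySem has no title)
def pvTitleChars : List Char → Bool → List Char
  | [], _ => []
  | c :: cs, prevCased =>
    if PySem.Chars.isalpha c then
      (if prevCased then PySem.Chars.lowerChar c else PySem.Chars.upperChar c) :: pvTitleChars cs true
    else
      c :: pvTitleChars cs false

def pvTitle (s : String) : String := String.ofList (pvTitleChars s.toList false)

-- the fallback "\n".join(f"{role.title()}: {content}") — textually identical code in A and B
def pvFullConversation (conversation_history : List (List (String × String))) : String :=
  PySem.Str.join "\n" (conversation_history.map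
    (fun turn => pvTitle (pvGet turn "role") ++ ": " ++ pvGet turn "content"))

-- ===== PORT A =====
-- loop body of A: state = (chunks, current_chunk)
def pvStepA (st : List String × String) (turn : List (String × String)) : List String × String :=
  let role := pvGet turn "role"
  let content := pvGet turn "content"
  if role == "user" then
    ((if st.2 == "" then st.1 else st.1 ++ [PySem.Str.strip st.2]), "User: " ++ content ++ "\n")
  else if role == "assistant" then
    (st.1, st.2 ++ ("Assistant: " ++ content ++ "\n"))
  else st

def chunk_conversation (conversation_history : List (List (String × String))) : List String :=
  let st := conversation_history.foldl pvStepA ([], "")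
  let chunks := if PySem.Str.strip st.2 == "" then st.1 else st.1 ++ [PySem.Str.strip st.2]
  if chunks == [] then [pvFullConversation conversation_history] else chunks

-- ===== PORT B =====
-- "User: "/"Assistant: " line for one stored (role, content) pair
def pvLine (p : String × String) : String :=
  (if p.1 == "user" then "User: " else "Assistant: ") ++ p.2

-- groups[-1].append(p) if groups else groups = [[p]]
def pvPushLast : List (List (String × String)) → (String × String) → List (List (String × String))
  | [], p => [[p]]
  | [g], p => [g ++ [p]]
  | g :: g' :: gs, p => g :: pvPushLast (g' :: gs) p

-- loop body of B: state = groups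
def pvStepB (gs : List (List (String × String))) (turn : List (String × String)) :
    List (List (String × String)) :=
  let role := pvGet turn "role"
  if role == "user" then gs ++ [[("user", pvGet turn "content")]]
  else if role == "assistant" then pvPushLast gs ("assistant", pvGet turn "content")
  else gs

-- render one group: "\n".join(lines).strip()
def pvRender (g : List (String × String)) : String :=
  PySem.Str.strip (PySem.Str.join "\n" (g.map pvLine))

def chunk_conversation_alt (conversation_history : List (List (String × String))) : List String :=
  let groups := conversation_history.foldl pvStepB []
  if groups == [] then [pvFullConversation conversation_history]
  else groups.map pvRender

-- ===== PRECONDITION & SPEC =====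
def Spec_chunk_conversation (conversation_history : List (List (String × String))) (out : List String) : Prop := out = chunk_conversation_alt conversation_history
instance (conversation_history : List (List (String × String))) (out : List String) : Decidable (Spec_chunk_conversation conversation_history out) := by unfold Spec_chunk_conversation; infer_instance

-- ===== CLAIM (what is proved, stated in full; the proofs are below) =====
def Claim_equal_chunk_conversation : Prop := ∀ (conversation_history : List (List (String × String))), Dom_chunk_conversation conversation_history → Spec_chunk_conversation conversation_history (chunk_conversation conversation_history)

-- ===== LEMMAS AND PROOFS =====

-- A's current_chunk, reconstructed from B's last group
def pvCurOf : List (String × String) → String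
  | [] => ""
  | p :: g => (pvLine p ++ "\n") ++ pvCurOf g

theorem pvCurOf_concat (g : List (String × String)) (p : String × String) :
    pvCurOf (g ++ [p]) = pvCurOf g ++ (pvLine p ++ "\n") := by
  induction g with
  | nil =>
    apply String.toList_inj.mp
    simp [pvCurOf]
  | cons q g ih =>
    apply String.toList_inj.mp
    simp only [List.cons_append, pvCurOf, ih, String.toList_append, List.append_assoc]

theorem pvPushLast_concat (init : List (List (String × String))) (g : List (String × String))
    (p : String × String) : pvPushLast (init ++ [g]) p = init ++ [g ++ [p]] := by
  induction init with
  | nil => rfl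
  | cons i init ih =>
    cases init with
    | nil => rfl
    | cons j init' =>
      show pvPushLast (i :: ((j :: init') ++ [g])) p = _
      rw [show (j :: init') ++ [g] = j :: (init' ++ [g]) from rfl]
      cases hd : init' ++ [g] with
      | nil => simp at hd
      | cons x xs =>
        rw [pvPushLast, ← hd, show j :: (init' ++ [g]) = (j :: init') ++ [g] from rfl, ih]
        rfl

theorem pv_strip_append_newline (cs : List Char) :
    PySem.Chars.strip (cs ++ ['\n']) = PySem.Chars.strip cs := by
  unfold PySem.Chars.strip PySem.Chars.lstrip PySem.Chars.rstrip
  rw [List.dropWhile_append]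
  split
  · rename_i h
    simp only [List.isEmpty_iff] at h
    rw [h]
    rfl
  · simp only [List.reverse_append, List.reverse_cons, List.reverse_nil, List.nil_append,
      List.singleton_append]
    rw [List.dropWhile_cons_of_pos (by decide)]

theorem pv_strip_cons_nonspace (c : Char) (cs : List Char) (h : PySem.Chars.isspace c = false) :
    PySem.Chars.strip (c :: cs) ≠ [] := by
  unfold PySem.Chars.strip PySem.Chars.lstrip PySem.Chars.rstrip
  rw [List.dropWhile_cons_of_neg (by simp [h])]
  simp
  exact ⟨c, Or.inr rfl, h⟩

-- first char of a rendered line is 'U' or 'A'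
theorem pvLine_toList (p : String × String) :
    ∃ t, (pvLine p).toList = (if p.1 == "user" then 'U' else 'A') :: t := by
  unfold pvLine
  split
  · exact ⟨"ser: ".toList ++ p.2.toList, by rw [String.toList_append]; rfl⟩
  · exact ⟨"ssistant: ".toList ++ p.2.toList, by rw [String.toList_append]; rfl⟩

-- toList characterisation of pvCurOf: the joined lines plus a trailing newline
theorem pvCurOf_toList (p : String × String) (g : List (String × String)) :
    (pvCurOf (p :: g)).toList =
      PySem.Chars.join ['\n'] (((p :: g).map pvLine).map String.toList) ++ ['\n'] := by
  induction g generalizing p with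
  | nil =>
    simp [pvCurOf, PySem.Chars.join_singleton]
  | cons q g ih =>
    rw [show pvCurOf (p :: q :: g) = (pvLine p ++ "\n") ++ pvCurOf (q :: g) from rfl,
      String.toList_append, ih q]
    simp only [List.map_cons]
    rw [PySem.Chars.join_cons_cons]
    simp

theorem pvCurOf_ne_empty (p : String × String) (g : List (String × String)) :
    pvCurOf (p :: g) ≠ "" := by
  intro h
  have := congrArg String.toList h
  rw [pvCurOf_toList] at this
  simp at this

theorem pv_strip_curOf (p : String × String) (g : List (String × String)) :
    PySem.Str.strip (pvCurOf (p :: g)) = pvRender (p :: g) := by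
  apply String.toList_inj.mp
  rw [PySem.Str.toList_strip, pvCurOf_toList, pv_strip_append_newline, pvRender,
    PySem.Str.toList_strip, PySem.Str.toList_join]
  rfl

theorem pvRender_ne_empty (p : String × String) (g : List (String × String)) :
    pvRender (p :: g) ≠ "" := by
  intro h
  have hl := congrArg String.toList h
  rw [pvRender, PySem.Str.toList_strip, PySem.Str.toList_join] at hl
  obtain ⟨t, ht⟩ := pvLine_toList p
  have hns : PySem.Chars.isspace (if p.1 == "user" then 'U' else 'A') = false := by
    split <;> decide
  cases g with
  | nil =>
    rw [show ((([p].map pvLine)).map String.toList) = [(pvLine p).toList] from rfl,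
      PySem.Chars.join_singleton, ht] at hl
    exact pv_strip_cons_nonspace _ _ hns (by simpa using hl)
  | cons q g' =>
    simp only [List.map_cons] at hl
    rw [PySem.Chars.join_cons_cons, ht] at hl
    rw [List.cons_append, List.cons_append] at hl
    exact pv_strip_cons_nonspace _ _ hns (by simpa using hl)

-- the simulation invariant between A's state and B's state
def pvInv (st : List String × String) (gs : List (List (String × String))) : Prop :=
  (gs = [] ∧ st = ([], "")) ∨
  (∃ init g, gs = init ++ [g] ∧ g ≠ [] ∧ st.1 = init.map pvRender ∧ st.2 = pvCurOf g)

theorem pvInv_step (st : List String × String) (gs : List (List (String × String)))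
    (turn : List (String × String)) (h : pvInv st gs) : pvInv (pvStepA st turn) (pvStepB gs turn) := by
  unfold pvStepA pvStepB pvInv
  by_cases hu : (pvGet turn "role" == "user") = true
  · simp only [hu, if_true]
    rcases h with ⟨hgs, hst⟩ | ⟨init, g, hgs, hg, h1, h2⟩
    · subst hgs; rw [hst]
      refine Or.inr ⟨[], [("user", pvGet turn "content")], by simp, by simp, by simp, ?_⟩
      apply String.toList_inj.mp
      simp [pvCurOf, pvLine]
    · obtain ⟨p, g', rfl⟩ : ∃ p g', g = p :: g' := by
        cases g with
        | nil => exact absurd rfl hg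
        | cons a b => exact ⟨a, b, rfl⟩
      have hne : (st.2 == "") = false := by
        rw [h2]; exact beq_eq_false_iff_ne.mpr (pvCurOf_ne_empty p g')
      subst hgs
      refine Or.inr ⟨init ++ [p :: g'], [("user", pvGet turn "content")], by simp, by simp, ?_, ?_⟩
      · simp only [hne, Bool.false_eq_true, if_false]
        rw [h1, h2, pv_strip_curOf]
        simp
      · apply String.toList_inj.mp
        simp [pvCurOf, pvLine]
  · by_cases ha : (pvGet turn "role" == "assistant") = true
    · simp only [hu, ha, if_true, Bool.false_eq_true, if_false]
      rcases h with ⟨hgs, hst⟩ | ⟨init, g, hgs, hg, h1, h2⟩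
      · subst hgs; rw [hst]
        refine Or.inr ⟨[], [("assistant", pvGet turn "content")], by rfl, by simp, by simp, ?_⟩
        apply String.toList_inj.mp
        simp [pvCurOf, pvLine]
      · subst hgs
        rw [pvPushLast_concat]
        refine Or.inr ⟨init, g ++ [("assistant", pvGet turn "content")], rfl, by simp, h1, ?_⟩
        rw [pvCurOf_concat]
        apply String.toList_inj.mp
        simp [pvLine, h2]
    · simp only [hu, ha, Bool.false_eq_true, if_false]
      exact h

theorem pvInv_foldl (h : List (List (String × String))) (st : List String × String)
    (gs : List (List (String × String))) (hi : pvInv st gs) :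
    pvInv (h.foldl pvStepA st) (h.foldl pvStepB gs) := by
  induction h generalizing st gs with
  | nil => exact hi
  | cons t ts ih => exact ih _ _ (pvInv_step st gs t hi)

-- ===== VERDICT (by name: the statement is the Claim_ definition above) =====
theorem chunk_conversation_spec : Claim_equal_chunk_conversation := by
  unfold Claim_equal_chunk_conversation Spec_chunk_conversation
  intro h _
  have H := pvInv_foldl h ([], "") [] (Or.inl ⟨rfl, rfl⟩)
  unfold chunk_conversation chunk_conversation_alt
  rcases H with ⟨hgs, hst⟩ | ⟨init, g, hgs, hg, h1, h2⟩
  · rw [hgs, hst]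
    simp [show (PySem.Str.strip "" == "") = true from rfl]
  · obtain ⟨p, g', rfl⟩ : ∃ p g', g = p :: g' := by
      cases g with
      | nil => exact absurd rfl hg
      | cons a b => exact ⟨a, b, rfl⟩
    have hstrip : PySem.Str.strip (h.foldl pvStepA ([], "")).2 = pvRender (p :: g') := by
      rw [h2, pv_strip_curOf]
    have hne : (PySem.Str.strip (h.foldl pvStepA ([], "")).2 == "") = false := by
      rw [hstrip]; exact beq_eq_false_iff_ne.mpr (pvRender_ne_empty p g')
    simp only [hne, Bool.false_eq_true, if_false]
    have hchunks : (h.foldl pvStepA ([], "")).1 ++ [PySem.Str.strip (h.foldl pvStepA ([], "")).2]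
        = (init ++ [p :: g']).map pvRender := by
      rw [h1, hstrip]; simp
    rw [hchunks, hgs]
    simp
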